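-- pv_equiv track=rewrite | github.com/proscrite/ManHatTan | mht/gui/book_processor/kivy_cadera_DfWidget.py | _build_row_data
-- ===== SOURCE A (Python) =====
-- from collections import OrderedDict
--
-- def _build_row_data(col_data, keys, max_len):
--     """Build row-wise data for the table, truncating long entries."""
--     data = []
--     for i in range(max_len):
--         row = OrderedDict()
--         for col in keys:
--             val = str(col_data[col][i])
--             if len(val) > 40:
--                 space_idx = val.find(' ', 40)
--                 if space_idx != -1:
--                     val = val[:space_idx] + "(...)"
--                 else:
--                     val = val[:50] + "(...)"
--             row[col] = val
--         data.append(row)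
--     return data
-- ===== SOURCE B (Python) =====
-- from collections import OrderedDict
--
--
-- def _truncate(val):
--     if len(val) > 40:
--         space_idx = val.find(' ', 40)
--         if space_idx != -1:
--             return val[:space_idx] + "(...)"
--         return val[:50] + "(...)"
--     return val
--
--
-- def _build_row_data(col_data, keys, max_len):
--     """Column-major: truncate each column once, then assemble the rows."""
--     trunc = {col: [_truncate(str(col_data[col][i])) for i in range(max_len)]
--              for col in keys}
--     rows = []
--     for i in range(max_len):
--         row = OrderedDict()
--         for col in keys:
--             row[col] = trunc[col][i]
--         rows.append(row)
--     return rows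
-- ===== Notes on version B (the rewrite author's own statement) =====
-- stated objective: alternative
-- what changed: B factors the truncation into a helper and builds a per-column truncated table in one column-major pass, then assembles the rows in a second pass that only reads the table, instead of A's single interleaved row-major loop that looks up and truncates cell by cell.
import Mathlib
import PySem

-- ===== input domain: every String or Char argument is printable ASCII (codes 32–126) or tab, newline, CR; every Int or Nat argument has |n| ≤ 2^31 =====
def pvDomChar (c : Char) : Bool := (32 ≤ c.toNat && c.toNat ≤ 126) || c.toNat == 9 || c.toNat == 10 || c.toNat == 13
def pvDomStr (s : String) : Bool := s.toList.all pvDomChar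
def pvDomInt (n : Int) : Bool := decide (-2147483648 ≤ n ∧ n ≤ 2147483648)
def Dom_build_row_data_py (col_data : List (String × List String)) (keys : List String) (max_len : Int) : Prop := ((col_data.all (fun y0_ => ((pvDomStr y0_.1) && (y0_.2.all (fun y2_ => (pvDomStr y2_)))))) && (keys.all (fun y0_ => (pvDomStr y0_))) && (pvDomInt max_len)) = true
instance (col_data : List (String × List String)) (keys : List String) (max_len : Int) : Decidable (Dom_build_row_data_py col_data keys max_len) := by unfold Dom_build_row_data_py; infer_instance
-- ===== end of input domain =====

-- B builds a per-column truncated table first (column-major) and assembles the rows in a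
-- second pass, instead of A's interleaved row-major loop; same cost, different decomposition.

-- ===== PORT A =====
-- literal transliteration of A's interleaved row loop (truncation inlined, as in A)
def build_row_data_py (col_data : List (String × List String)) (keys : List String) (max_len : Int) : List (List (String × String)) :=
  (PySem.List.pyRange 0 max_len 1).foldl (fun data i =>
    let row : PySem.Dict String String :=
      keys.foldl (fun row col =>
        let val := PySem.List.pyGetD (PySem.Dict.getD (PySem.Dict.mk col_data) col []) i ""
        let val :=
          if PySem.Str.len val > 40 then
            let space_idx := PySem.Str.findFrom val " " 40 none
            if space_idx ≠ -1 then
              PySem.Str.slice val none (some space_idx) ++ "(...)"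
            else
              PySem.Str.slice val none (some 50) ++ "(...)"
          else val
        row.insert col val) PySem.Dict.empty
    data ++ [row.items]) []

-- ===== PORT B =====
-- helper _truncate of Source B
def pyTruncate (val : String) : String :=
  if PySem.Str.len val > 40 then
    let space_idx := PySem.Str.findFrom val " " 40 none
    if space_idx ≠ -1 then
      PySem.Str.slice val none (some space_idx) ++ "(...)"
    else
      PySem.Str.slice val none (some 50) ++ "(...)"
  else val

def build_row_data_py_alt (col_data : List (String × List String)) (keys : List String) (max_len : Int) : List (List (String × String)) :=
  let trunc : PySem.Dict String (List String) :=
    keys.foldl (fun d col =>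
      d.insert col ((PySem.List.pyRange 0 max_len 1).map (fun i =>
        pyTruncate (PySem.List.pyGetD (PySem.Dict.getD (PySem.Dict.mk col_data) col []) i ""))))
      PySem.Dict.empty
  (PySem.List.pyRange 0 max_len 1).foldl (fun rows i =>
    let row : PySem.Dict String String :=
      keys.foldl (fun row col =>
        row.insert col (PySem.List.pyGetD (PySem.Dict.getD trunc col []) i "")) PySem.Dict.empty
    rows ++ [row.items]) []

-- ===== PRECONDITION & SPEC =====
-- Pre_: Python A raises KeyError/IndexError when some requested row index reaches a missing
-- or too-short column; it returns normally iff max_len ≤ 0 or every key maps (first match)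
-- to a column of length ≥ max_len.
def Pre_build_row_data_py (col_data : List (String × List String)) (keys : List String) (max_len : Int) : Prop :=
  max_len ≤ 0 ∨ ∀ col ∈ keys, ∃ l, List.lookup col col_data = some l ∧ max_len ≤ (l.length : Int)
instance (col_data : List (String × List String)) (keys : List String) (max_len : Int) : Decidable (Pre_build_row_data_py col_data keys max_len) := by unfold Pre_build_row_data_py; infer_instance

def pvWitness_build_row_data_py : (List (String × List String)) × List String × Int :=
  ([("a", ["x", "y"]), ("b", ["u", "v"])], ["b", "a"], 2)

def Spec_build_row_data_py (col_data : List (String × List String)) (keys : List String) (max_len : Int) (out : List (List (String × String))) : Prop := out = build_row_data_py_alt col_data keys max_len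
instance (col_data : List (String × List String)) (keys : List String) (max_len : Int) (out : List (List (String × String))) : Decidable (Spec_build_row_data_py col_data keys max_len out) := by unfold Spec_build_row_data_py; infer_instance

-- ===== CLAIM (what is proved, stated in full; the proofs are below) =====
def Claim_equal_build_row_data_py : Prop := ∀ (col_data : List (String × List String)) (keys : List String) (max_len : Int), Dom_build_row_data_py col_data keys max_len → Pre_build_row_data_py col_data keys max_len → Spec_build_row_data_py col_data keys max_len (build_row_data_py col_data keys max_len)

-- ===== LEMMAS AND PROOFS =====

-- folding inserts of f c over ks leaves d.getD unchanged at keys not in ks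
theorem pv_fold_insert_getD_not_mem {ν : Type} (ks : List String) (f : String → ν)
    (d : PySem.Dict String ν) (col : String) (d0 : ν) (h : col ∉ ks) :
    (ks.foldl (fun d c => d.insert c (f c)) d).getD col d0 = d.getD col d0 := by
  induction ks generalizing d with
  | nil => rfl
  | cons k rest ih =>
      simp only [List.foldl_cons]
      rw [ih _ (by simp_all), PySem.Dict.getD_insert_of_ne]
      intro hc; exact h (by simp [hc])

-- folding inserts of f c over ks yields f col at every col ∈ ks (value depends only on the key)
theorem pv_fold_insert_getD_mem {ν : Type} (ks : List String) (f : String → ν)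
    (d : PySem.Dict String ν) (col : String) (d0 : ν) (h : col ∈ ks) :
    (ks.foldl (fun d c => d.insert c (f c)) d).getD col d0 = f col := by
  induction ks generalizing d with
  | nil => simp at h
  | cons k rest ih =>
      simp only [List.foldl_cons]
      by_cases hr : col ∈ rest
      · exact ih _ hr
      · have hk : col = k := by rcases List.mem_cons.mp h with h' | h' <;> simp_all
        subst hk
        rw [pv_fold_insert_getD_not_mem rest f _ col d0 hr, PySem.Dict.getD_insert_self]

theorem pv_main (cd : List (String × List String)) (keys : List String) (ml : Int) :
    build_row_data_py cd keys ml = build_row_data_py_alt cd keys ml := by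
  unfold build_row_data_py build_row_data_py_alt
  apply PySem.List.foldl_congr_mem
  intro acc i hi
  have hmem := PySem.List.mem_pyRange_one.mp hi
  refine congrArg (fun r : PySem.Dict String String => acc ++ [r.items]) ?_
  apply PySem.List.foldl_congr_mem
  intro row col hcol
  show row.insert col _ = row.insert col _
  rw [pv_fold_insert_getD_mem keys _ _ col [] hcol,
      PySem.List.pyGetD_map_pyRange_of_nonneg _ ml i _ hmem.1 hmem.2]
  rfl

-- ===== VERDICT (by name: the statement is the Claim_ definition above) =====
theorem build_row_data_py_spec : Claim_equal_build_row_data_py := by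
  intro cd keys ml _ _
  unfold Spec_build_row_data_py
  exact pv_main cd keys ml
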